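-- pv_equiv track=rewrite | github.com/shreya-212/Dsa | 06.Sliding-Window_and_Two-pointers/substring_containing_all_3_chars.py | numberOfSubstrings
-- ===== SOURCE A (Python) =====
-- def numberOfSubstrings(s):
--     count=0
--     for i in range(len(s)):
--         freq={'a':0,'b':0,'c':0}
--         for j in range(i,len(s)):
--             if s[j] in freq:
--                 freq[s[j]]+=1
--             if freq['a']>0 and freq['b']>0 and freq['c']>0:
--                 count+=len(s)-j
--                 break
--     return count
-- ===== SOURCE B (Python) =====
-- def numberOfSubstrings(s):
--     # O(n): for each right end j, every start i <= min(last seen a,b,c) works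
--     count = 0
--     la = lb = lc = -1
--     for j, ch in enumerate(s):
--         if ch == 'a':
--             la = j
--         elif ch == 'b':
--             lb = j
--         elif ch == 'c':
--             lc = j
--         count += min(la, lb, lc) + 1
--     return count
-- ===== Notes on version B (the rewrite author's own statement) =====
-- stated objective: faster
-- what changed: Replaced the quadratic scan (for each start, advance until all of a,b,c seen) by a single left-to-right pass tracking the last-seen index of each of a,b,c and adding min(last)+1 per right endpoint.
import Mathlib
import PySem

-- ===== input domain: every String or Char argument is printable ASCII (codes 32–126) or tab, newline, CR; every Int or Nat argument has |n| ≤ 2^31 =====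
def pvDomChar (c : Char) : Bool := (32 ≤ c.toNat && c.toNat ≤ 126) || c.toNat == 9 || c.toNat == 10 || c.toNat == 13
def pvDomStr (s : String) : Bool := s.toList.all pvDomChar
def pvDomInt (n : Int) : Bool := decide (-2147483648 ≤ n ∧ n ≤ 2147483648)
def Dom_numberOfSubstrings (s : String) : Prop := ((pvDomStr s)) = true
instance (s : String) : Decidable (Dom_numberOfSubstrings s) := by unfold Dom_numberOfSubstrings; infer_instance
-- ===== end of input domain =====

-- B replaces A's quadratic per-start scan by one left-to-right pass tracking the last-seen
-- index of each of 'a','b','c' and adding min(last)+1 per right endpoint (objective: faster).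


-- ===== PORT A =====
-- inner loop `for j in range(i, len(s)): … s[j] …` is iterated as the suffix `l.drop i`
-- with the index j carried along (same elements, same order, same j); `s[j] in freq` →
-- `(freq.get? ch).isSome`; `freq[s[j]] += 1` → insert of getD+1 (the key is present, so
-- this is exactly Python's in-place update); `count += len(s)-j; break` → return `n - j`.
def pvInnerA (n : Nat) : Nat → List Char → PySem.Dict Char Int → Int
  | _, [], _ => 0
  | j, ch :: rest, freq =>
    let freq := if (freq.get? ch).isSome then freq.insert ch (freq.getD ch 0 + 1) else freq
    if freq.getD 'a' 0 > 0 ∧ freq.getD 'b' 0 > 0 ∧ freq.getD 'c' 0 > 0 then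
      (n : Int) - (j : Int)
    else pvInnerA n (j + 1) rest freq

def numberOfSubstrings (s : String) : Int :=
  let l := s.toList
  (List.range l.length).foldl
    (fun count i =>
      count + pvInnerA l.length i (l.drop i) (PySem.Dict.ofList [('a', 0), ('b', 0), ('c', 0)]))
    0

-- ===== PORT B =====
def pvStepB (st : Int × Int × Int × Int) (p : Int × Char) : Int × Int × Int × Int :=
  let (count, la, lb, lc) := st
  let (j, ch) := p
  let (la, lb, lc) :=
    if ch = 'a' then (j, lb, lc)
    else if ch = 'b' then (la, j, lc)
    else if ch = 'c' then (la, lb, j)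
    else (la, lb, lc)
  (count + (min (min la lb) lc + 1), la, lb, lc)

def numberOfSubstrings_alt (s : String) : Int :=
  ((PySem.List.enumerate s.toList).foldl pvStepB (0, -1, -1, -1)).1

-- ===== PRECONDITION & SPEC =====
def Spec_numberOfSubstrings (s : String) (out : Int) : Prop := out = numberOfSubstrings_alt s
instance (s : String) (out : Int) : Decidable (Spec_numberOfSubstrings s out) := by unfold Spec_numberOfSubstrings; infer_instance

-- ===== CLAIM (what is proved, stated in full; the proofs are below) =====
def Claim_equal_numberOfSubstrings : Prop := ∀ (s : String), Dom_numberOfSubstrings s → Spec_numberOfSubstrings s (numberOfSubstrings s)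

-- ===== LEMMAS AND PROOFS =====

-- segment s[i..j] contains all of a,b,c
abbrev pvGood (l : List Char) (i j : Nat) : Prop :=
  'a' ∈ (l.take (j + 1)).drop i ∧ 'b' ∈ (l.take (j + 1)).drop i ∧ 'c' ∈ (l.take (j + 1)).drop i

-- abstract boolean version of A's inner loop: 1 per right end at/after the first full window
def pvCnt : List Char → Bool → Bool → Bool → Int
  | [], _, _, _ => 0
  | ch :: r, ha, hb, hc =>
    let ha := ha || (ch == 'a')
    let hb := hb || (ch == 'b')
    let hc := hc || (ch == 'c')
    (if ha && hb && hc then 1 else 0) + pvCnt r ha hb hc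

def pvFreqD (ca cb cc : Int) : PySem.Dict Char Int :=
  ((PySem.Dict.empty.insert 'a' ca).insert 'b' cb).insert 'c' cc

lemma pvCnt_true (r : List Char) : pvCnt r true true true = (r.length : Int) := by
  induction r with
  | nil => rfl
  | cons ch r ih => simp [pvCnt, ih]; ring

lemma pvFreq_get? (ca cb cc : Int) (ch : Char) :
    (pvFreqD ca cb cc).get? ch =
      if ch = 'c' then some cc else if ch = 'b' then some cb else if ch = 'a' then some ca else none := by
  simp [pvFreqD, PySem.Dict.get?_insert, PySem.Dict.get?_empty]

lemma pvFreq_insert_a (ca cb cc v : Int) : (pvFreqD ca cb cc).insert 'a' v = pvFreqD v cb cc := by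
  simp [pvFreqD, PySem.Dict.insert, PySem.Dict.empty]

lemma pvFreq_insert_b (ca cb cc v : Int) : (pvFreqD ca cb cc).insert 'b' v = pvFreqD ca v cc := by
  simp [pvFreqD, PySem.Dict.insert, PySem.Dict.empty]

lemma pvFreq_insert_c (ca cb cc v : Int) : (pvFreqD ca cb cc).insert 'c' v = pvFreqD ca cb v := by
  simp [pvFreqD, PySem.Dict.insert, PySem.Dict.empty]

lemma pvFreq_getD_a (ca cb cc : Int) : (pvFreqD ca cb cc).getD 'a' 0 = ca := by
  simp [pvFreqD, PySem.Dict.getD_insert]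
lemma pvFreq_getD_b (ca cb cc : Int) : (pvFreqD ca cb cc).getD 'b' 0 = cb := by
  simp [pvFreqD, PySem.Dict.getD_insert]
lemma pvFreq_getD_c (ca cb cc : Int) : (pvFreqD ca cb cc).getD 'c' 0 = cc := by
  simp [pvFreqD, PySem.Dict.getD_insert]

lemma pvFreq_update (ca cb cc : Int) (ch : Char) :
    (if ((pvFreqD ca cb cc).get? ch).isSome
      then (pvFreqD ca cb cc).insert ch ((pvFreqD ca cb cc).getD ch 0 + 1)
      else pvFreqD ca cb cc)
    = pvFreqD (if ch = 'a' then ca + 1 else ca) (if ch = 'b' then cb + 1 else cb)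
        (if ch = 'c' then cc + 1 else cc) := by
  by_cases h1 : ch = 'a'
  · subst h1; simp [pvFreq_get?, pvFreq_getD_a, pvFreq_insert_a]
  · by_cases h2 : ch = 'b'
    · subst h2; simp [pvFreq_get?, pvFreq_getD_b, pvFreq_insert_b]
    · by_cases h3 : ch = 'c'
      · subst h3; simp [pvFreq_get?, pvFreq_getD_c, pvFreq_insert_c]
      · simp [pvFreq_get?, h1, h2, h3]

lemma pvInnerA_eq_cnt (rest : List Char) : ∀ (j : Nat) (ca cb cc : Int), 0 ≤ ca → 0 ≤ cb → 0 ≤ cc →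
    pvInnerA (j + rest.length) j rest (pvFreqD ca cb cc)
      = pvCnt rest (decide (0 < ca)) (decide (0 < cb)) (decide (0 < cc)) := by
  induction rest with
  | nil => intro j ca cb cc _ _ _; simp [pvInnerA, pvCnt]
  | cons ch r ih =>
    intro j ca cb cc ha hb hc
    simp only [pvInnerA, pvCnt, pvFreq_update, pvFreq_getD_a, pvFreq_getD_b, pvFreq_getD_c]
    have hda : (decide (0 < ca) || (ch == 'a')) = decide (0 < (if ch = 'a' then ca + 1 else ca)) := by
      by_cases h : ch = 'a' <;> simp [h]; omega
    have hdb : (decide (0 < cb) || (ch == 'b')) = decide (0 < (if ch = 'b' then cb + 1 else cb)) := by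
      by_cases h : ch = 'b' <;> simp [h]; omega
    have hdc : (decide (0 < cc) || (ch == 'c')) = decide (0 < (if ch = 'c' then cc + 1 else cc)) := by
      by_cases h : ch = 'c' <;> simp [h]; omega
    rw [hda, hdb, hdc]
    set ca' := if ch = 'a' then ca + 1 else ca with hca'
    set cb' := if ch = 'b' then cb + 1 else cb with hcb'
    set cc' := if ch = 'c' then cc + 1 else cc with hcc'
    have ha' : 0 ≤ ca' := by rw [hca']; split <;> omega
    have hb' : 0 ≤ cb' := by rw [hcb']; split <;> omega
    have hc' : 0 ≤ cc' := by rw [hcc']; split <;> omega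
    by_cases hcond : ca' > 0 ∧ cb' > 0 ∧ cc' > 0
    · rw [if_pos hcond]
      have e1 : decide (0 < ca') = true := by simp [hcond.1]
      have e2 : decide (0 < cb') = true := by simp [hcond.2.1]
      have e3 : decide (0 < cc') = true := by simp [hcond.2.2]
      rw [e1, e2, e3, pvCnt_true]
      simp [List.length_cons]
      ring
    · rw [if_neg hcond]
      have : (decide (0 < ca') && decide (0 < cb') && decide (0 < cc')) = false := by
        by_cases h1 : 0 < ca' <;> by_cases h2 : 0 < cb' <;> by_cases h3 : 0 < cc' <;>
          simp [h1, h2, h3] <;> tauto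
      rw [this]
      have hn : j + (ch :: r).length = (j + 1) + r.length := by simp [List.length_cons]; omega
      rw [hn, ih (j + 1) ca' cb' cc' ha' hb' hc']
      simp

lemma pvCnt_eq_sum (r : List Char) : ∀ (ha hb hc : Bool),
    pvCnt r ha hb hc
      = ∑ k ∈ Finset.range r.length,
          (if (ha = true ∨ 'a' ∈ r.take (k + 1)) ∧ (hb = true ∨ 'b' ∈ r.take (k + 1)) ∧
              (hc = true ∨ 'c' ∈ r.take (k + 1)) then (1 : Int) else 0) := by
  induction r with
  | nil => intro ha hb hc; simp [pvCnt]
  | cons ch r ih =>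
    intro ha hb hc
    rw [List.length_cons, Finset.sum_range_succ', add_comm]
    simp only [pvCnt]
    congr 1
    · apply if_congr _ rfl rfl
      simp only [List.take_succ_cons, List.take_zero, List.mem_cons, Bool.and_eq_true,
        Bool.or_eq_true, beq_iff_eq, List.not_mem_nil]
      constructor <;> intro h <;> simp_all <;> tauto
    · rw [ih]
      apply Finset.sum_congr rfl
      intro k _
      apply if_congr _ rfl rfl
      simp only [List.take_succ_cons, List.mem_cons, Bool.or_eq_true, beq_iff_eq]
      constructor <;> intro h <;> exact ⟨by tauto, by tauto, by tauto⟩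

-- last-seen index, as B maintains it
def pvLastAux (c : Char) : List Char → Int → Int → Int
  | [], _, acc => acc
  | ch :: r, j, acc => pvLastAux c r (j + 1) (if ch = c then j else acc)

def pvLast (c : Char) (p : List Char) : Int := pvLastAux c p 0 (-1)

def pvMin3 (q : List Char) : Int := min (min (pvLast 'a' q) (pvLast 'b' q)) (pvLast 'c' q)

lemma pvLastAux_append (c x : Char) (p : List Char) : ∀ (j acc : Int),
    pvLastAux c (p ++ [x]) j acc = if x = c then j + p.length else pvLastAux c p j acc := by
  induction p with
  | nil => intro j acc; by_cases h : x = c <;> simp [pvLastAux, h]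
  | cons ch r ih =>
    intro j acc
    simp only [List.cons_append, pvLastAux, ih]
    by_cases h : x = c <;> simp [h] <;> ring

lemma pvLast_append (c x : Char) (p : List Char) :
    pvLast c (p ++ [x]) = if x = c then (p.length : Int) else pvLast c p := by
  have := pvLastAux_append c x p 0 (-1)
  simpa [pvLast] using this

lemma pvLast_bounds (c : Char) (p : List Char) : -1 ≤ pvLast c p ∧ pvLast c p < p.length := by
  induction p using List.reverseRecOn with
  | nil => simp [pvLast, pvLastAux]
  | append_singleton p x ih =>
    rw [pvLast_append]
    by_cases h : x = c <;> simp [h] <;> omega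

lemma pvLast_mem_drop (c : Char) (p : List Char) : ∀ (i : Nat), c ∈ p.drop i ↔ (i : Int) ≤ pvLast c p := by
  induction p using List.reverseRecOn with
  | nil => intro i; simp [pvLast, pvLastAux]; omega
  | append_singleton p x ih =>
    intro i
    rw [pvLast_append]
    by_cases hi : i ≤ p.length
    · rw [List.drop_append_of_le_length hi]
      by_cases h : x = c
      · simp [h, ih]; omega
      · simp [h, ih, Ne.symm h]
    · rw [List.drop_eq_nil_of_le (by simp; omega)]
      have hb := pvLast_bounds c p
      by_cases h : x = c <;> simp [h] <;> omega

-- B's loop as plain recursion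
def pvBloop : List Char → Int → Int → Int → Int → Int
  | [], _, _, _, _ => 0
  | ch :: r, j, la, lb, lc =>
    let (la, lb, lc) :=
      if ch = 'a' then (j, lb, lc)
      else if ch = 'b' then (la, j, lc)
      else if ch = 'c' then (la, lb, j)
      else (la, lb, lc)
    (min (min la lb) lc + 1) + pvBloop r (j + 1) la lb lc

lemma foldl_stepB (r : List Char) : ∀ (j cnt la lb lc : Int),
    ((PySem.List.enumerate r j).foldl pvStepB (cnt, la, lb, lc)).1 = cnt + pvBloop r j la lb lc := by
  induction r with
  | nil => intro j cnt la lb lc; simp [PySem.List.enumerate_nil, pvBloop]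
  | cons ch r ih =>
    intro j cnt la lb lc
    rw [PySem.List.enumerate_cons]
    simp only [List.foldl_cons, pvStepB, pvBloop]
    by_cases h1 : ch = 'a'
    · simp [h1, ih]; ring
    · by_cases h2 : ch = 'b'
      · simp [h1, h2, ih]; ring
      · by_cases h3 : ch = 'c'
        · simp [h1, h2, h3, ih]; ring
        · simp [h1, h2, h3, ih]; ring

lemma pvBloop_eq_sum (r : List Char) : ∀ (p : List Char),
    pvBloop r (p.length : Int) (pvLast 'a' p) (pvLast 'b' p) (pvLast 'c' p)
      = ∑ k ∈ Finset.range r.length, (pvMin3 (p ++ r.take (k + 1)) + 1) := by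
  induction r with
  | nil => intro p; simp [pvBloop]
  | cons ch r ih =>
    intro p
    have hup : (if ch = 'a' then ((p.length : Int), pvLast 'b' p, pvLast 'c' p)
        else if ch = 'b' then (pvLast 'a' p, (p.length : Int), pvLast 'c' p)
        else if ch = 'c' then (pvLast 'a' p, pvLast 'b' p, (p.length : Int))
        else (pvLast 'a' p, pvLast 'b' p, pvLast 'c' p))
        = (pvLast 'a' (p ++ [ch]), pvLast 'b' (p ++ [ch]), pvLast 'c' (p ++ [ch])) := by
      by_cases h1 : ch = 'a'
      · simp [pvLast_append, h1]
      · by_cases h2 : ch = 'b'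
        · simp [pvLast_append, h1, h2, Ne.symm]
        · by_cases h3 : ch = 'c'
          · simp [pvLast_append, h1, h2, h3]
          · simp [pvLast_append, h1, h2, h3]
    simp only [pvBloop, hup]
    have hlen : (p.length : Int) + 1 = ((p ++ [ch]).length : Int) := by simp
    rw [hlen, ih (p ++ [ch])]
    rw [List.length_cons, Finset.sum_range_succ', add_comm]
    congr 1
    · apply Finset.sum_congr rfl
      intro k _
      have harr : p ++ List.take (k + 1 + 1) (ch :: r) = (p ++ [ch]) ++ List.take (k + 1) r := by
        simp [List.take_succ_cons]
      rw [harr]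

lemma pvCount_le (t : Nat) (m : Int) (h1 : -1 ≤ m) (h2 : m < t) :
    ∑ i ∈ Finset.range t, (if (i : Int) ≤ m then (1 : Int) else 0) = m + 1 := by
  induction t with
  | zero => simp at h2 ⊢; omega
  | succ t ih =>
    rw [Finset.sum_range_succ]
    by_cases h : (t : Int) ≤ m
    · have hm : m = t := by omega
      subst hm
      have : ∀ i ∈ Finset.range t, (if (i : Int) ≤ (t : Int) then (1 : Int) else 0) = 1 := by
        intro i hi; simp at hi; simp; omega
      rw [Finset.sum_congr rfl this]
      simp
    · rw [ih (by omega)]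
      simp [h]

lemma pvBridge (l : List Char) (j : Nat) (hj : j < l.length) :
    ∑ i ∈ Finset.range (j + 1), (if pvGood l i j then (1 : Int) else 0)
      = pvMin3 (l.take (j + 1)) + 1 := by
  set q := l.take (j + 1) with hq
  have hlen : q.length = j + 1 := by rw [hq, List.length_take]; omega
  have hcond : ∀ i : Nat, pvGood l i j ↔ (i : Int) ≤ pvMin3 q := by
    intro i
    unfold pvGood pvMin3
    rw [← hq, pvLast_mem_drop, pvLast_mem_drop, pvLast_mem_drop, le_min_iff, le_min_iff]
    tauto
  have hrw : ∀ i ∈ Finset.range (j + 1),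
      (if pvGood l i j then (1 : Int) else 0) = (if (i : Int) ≤ pvMin3 q then 1 else 0) := by
    intro i _; exact if_congr (hcond i) rfl rfl
  rw [Finset.sum_congr rfl hrw]
  have b1 := pvLast_bounds 'a' q
  have b2 := pvLast_bounds 'b' q
  have b3 := pvLast_bounds 'c' q
  rw [hlen] at b1 b2 b3
  apply pvCount_le
  · unfold pvMin3; rw [le_min_iff, le_min_iff]; exact ⟨⟨b1.1, b2.1⟩, b3.1⟩
  · calc pvMin3 q ≤ pvLast 'a' q := le_trans (min_le_left _ _) (min_le_left _ _)
      _ < ((j + 1 : Nat) : Int) := b1.2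

lemma pvFoldRangeSum (f : Nat → Int) (n : Nat) : ∀ (c : Int),
    (List.range n).foldl (fun acc i => acc + f i) c = c + ∑ i ∈ Finset.range n, f i := by
  induction n with
  | zero => intro c; simp
  | succ n ih =>
    intro c
    rw [List.range_succ, List.foldl_append, ih, Finset.sum_range_succ]
    simp; ring

-- ===== VERDICT (by name: the statement is the Claim_ definition above) =====
theorem numberOfSubstrings_spec : Claim_equal_numberOfSubstrings := by
  intro s _
  unfold Spec_numberOfSubstrings numberOfSubstrings numberOfSubstrings_alt
  simp only []
  set l := s.toList with hl
  set n := l.length with hn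
  rw [pvFoldRangeSum (fun i => pvInnerA n i (l.drop i)
        (PySem.Dict.ofList [('a', 0), ('b', 0), ('c', 0)])) n 0, zero_add]
  have hA : ∀ i ∈ Finset.range n,
      pvInnerA n i (l.drop i) (PySem.Dict.ofList [('a', 0), ('b', 0), ('c', 0)])
        = ∑ k ∈ Finset.range (n - i), (if pvGood l i (i + k) then (1 : Int) else 0) := by
    intro i hi
    rw [Finset.mem_range] at hi
    have hofl : PySem.Dict.ofList [('a', (0 : Int)), ('b', 0), ('c', 0)] = pvFreqD 0 0 0 := rfl
    have hdlen : (l.drop i).length = n - i := by simp [hn]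
    have hn' : n = i + (l.drop i).length := by rw [hdlen]; omega
    rw [hofl, hn', pvInnerA_eq_cnt _ i 0 0 0 le_rfl le_rfl le_rfl, pvCnt_eq_sum, hdlen]
    rw [show i + (n - i) - i = n - i from by omega]
    apply Finset.sum_congr rfl
    intro k _
    apply if_congr _ rfl rfl
    have hseg : (l.drop i).take (k + 1) = (l.take (i + k + 1)).drop i := by
      rw [List.drop_take]; congr 1; omega
    rw [hseg]
    unfold pvGood
    simp
  rw [Finset.sum_congr rfl hA]
  have hre : ∀ i ∈ Finset.range n,
      ∑ k ∈ Finset.range (n - i), (if pvGood l i (i + k) then (1 : Int) else 0)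
        = ∑ j ∈ Finset.Ico i n, (if pvGood l i j then (1 : Int) else 0) := by
    intro i _
    rw [Finset.sum_Ico_eq_sum_range]
  rw [Finset.sum_congr rfl hre, Finset.range_eq_Ico, Finset.sum_Ico_Ico_comm]
  have hbr : ∀ j ∈ Finset.Ico 0 n,
      ∑ i ∈ Finset.Ico 0 (j + 1), (if pvGood l i j then (1 : Int) else 0)
        = pvMin3 (l.take (j + 1)) + 1 := by
    intro j hj
    rw [Finset.mem_Ico] at hj
    rw [← Finset.range_eq_Ico]
    exact pvBridge l j hj.2
  rw [Finset.sum_congr rfl hbr]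
  have hB : ((PySem.List.enumerate l).foldl pvStepB (0, -1, -1, -1)).1
      = ∑ k ∈ Finset.range n, (pvMin3 (l.take (k + 1)) + 1) := by
    have h0 : ((PySem.List.enumerate l 0).foldl pvStepB (0, -1, -1, -1)).1
        = 0 + pvBloop l 0 (-1) (-1) (-1) := foldl_stepB l 0 0 (-1) (-1) (-1)
    have h1 := pvBloop_eq_sum l []
    simp only [List.nil_append, List.length_nil, Nat.cast_zero] at h1
    have h2 : pvLast 'a' [] = -1 := rfl
    have h3 : pvLast 'b' [] = -1 := rfl
    have h4 : pvLast 'c' [] = -1 := rfl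
    rw [h2, h3, h4] at h1
    rw [h0, h1, zero_add, hn]
  rw [hB, Finset.range_eq_Ico]
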